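-- pv_equiv track=rewrite | github.com/IvanaaXD/SIIT | SEMESTAR 3/Organizacija podataka/VJEZBE/Vjezbe 7/07_Serijska_i_Sekvencijalna_Primeri/datafiles-py-main/app/hash_functions.py | digit_overlap
-- ===== SOURCE A (Python) =====
-- import math
--
-- def digit_overlap(id, B, p, v=10):
--     id_str = str(id)[::-1]  # obrcemo string
--     n = math.ceil(math.log(B, v))  # uvek isto racunanje
--     q = math.floor(p / n*2)
--     T = 0
--
--     for k in range(0, q + 1):
--         for i in range(n):
--             r = 2 * k * n + i
--
--             if r < p:
--                 T += int(id_str[r]) * (v ** i)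
--
--     for k in range(1, q + 1):
--         for i in range(n):
--             s = 2 * k * n - i - 1
--
--             if s < p:
--                 T += int(id_str[s]) * (v ** i)
--
--     T %= v ** n
--
--     return 1 + math.floor(B / (v ** n) * T)
-- ===== SOURCE B (Python) =====
-- import math
--
-- def digit_overlap(id, B, p, v=10):
--     id_str = str(id)[::-1]
--     # exact integer ceil(log_v(B)) instead of float math.log
--     n = 0
--     x = 1
--     while x < B:
--         x *= v
--         n += 1
--     T = 0
--     for r in range(p):
--         d = int(id_str[r])
--         band, off = divmod(r, n)
--         T += d * (v ** off if band % 2 == 0 else v ** (n - 1 - off))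
--     T %= v ** n
--     return 1 + math.floor(B / (v ** n) * T)
-- ===== Notes on version B (the rewrite author's own statement) =====
-- stated objective: simpler
-- what changed: B replaces A's two nested zigzag loops (forward pass over even bands, backward pass over odd bands, each guarded by r < p) with a single pass over digit positions r = 0..p-1 that picks the forward or reversed weight from divmod(r, n) band parity, and computes n = ceil(log_v(B)) by an exact integer loop instead of float math.log.
-- outside the precondition, e.g. on digit_overlap(123, 125, 3, 5): A returns 8, B returns 39; on digit_overlap(123, 8, 3, 2): A returns 4, B returns 4
import Mathlib
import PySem

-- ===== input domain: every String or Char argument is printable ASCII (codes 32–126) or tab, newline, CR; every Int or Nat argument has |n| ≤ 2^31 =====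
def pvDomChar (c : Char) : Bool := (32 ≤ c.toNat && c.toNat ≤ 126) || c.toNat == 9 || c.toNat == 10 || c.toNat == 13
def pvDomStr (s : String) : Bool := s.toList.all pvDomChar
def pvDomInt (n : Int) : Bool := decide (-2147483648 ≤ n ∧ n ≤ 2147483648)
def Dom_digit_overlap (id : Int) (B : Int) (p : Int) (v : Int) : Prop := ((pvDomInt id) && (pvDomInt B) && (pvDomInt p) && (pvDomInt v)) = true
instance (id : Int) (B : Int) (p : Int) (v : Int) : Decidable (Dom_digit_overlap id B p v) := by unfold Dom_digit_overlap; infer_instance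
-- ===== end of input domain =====

-- B replaces A's two nested zigzag loops by ONE pass over the digit positions r = 0..p-1,
-- picking the forward or reversed weight from divmod(r, n) band parity, and computes
-- n = ceil(log_v B) by exact integer arithmetic instead of float math.log (objective: simpler).

-- ===== shared low-level helpers (identical Python subexpressions of A and B) =====

-- str(id)[::-1] : the decimal string of id, reversed
def pvRevStr (id : Int) : List Char := (PySem.Int.toChars id).reverse

-- int(id_str[r]) : exact where id_str[r] is a decimal digit character — guaranteed by
-- Pre_ for every index the programs reach; Python raises outside that.
def pvDigit (ds : List Char) (r : Int) : Int :=
  ((PySem.List.pyGet? ds r).map (fun c => ((c.toNat : Int) - 48))).getD 0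

-- Nearest-even IEEE-754 double of a/b (0 ≤ a, 0 < b), returned as (m, e) with value m·2^e.
-- Exact in the binary64 normal range reached here (quotients in (2^-62, 2^62)); no
-- overflow/subnormal handling is needed for those inputs.
def pvRoundQ (a b : Int) : Int × Int :=
  if a = 0 then (0, 0) else
  let d : Int := (PySem.Int.bitLength a : Int) - (PySem.Int.bitLength b : Int)
  let ge : Int → Bool := fun E => if 0 ≤ E then decide (b * 2 ^ E.toNat ≤ a) else decide (b ≤ a * 2 ^ (-E).toNat)
  let E := if ge d then d else d - 1
  let s := 52 - E
  let num := if 0 ≤ s then a * 2 ^ s.toNat else a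
  let den := if 0 ≤ s then b else b * 2 ^ (-s).toNat
  let m := num / den       -- num, den ≥ 0 here, so Euclidean / % = floor division
  let r := num % den
  (if 2 * r > den ∨ (2 * r = den ∧ m % 2 = 1) then m + 1 else m, E - 52)

-- 1 + math.floor(B / (v ** n) * T) on CPython: B/V is a correctly rounded double,
-- T is rounded to double on conversion, the product is rounded again, then floored.
def pvFinish (B V T : Int) : Int :=
  let x := pvRoundQ B V
  let t := pvRoundQ T 1
  let a := x.1 * t.1
  let e := x.2 + t.2
  let y := if 0 ≤ e then pvRoundQ (a * 2 ^ e.toNat) 1 else pvRoundQ a (2 ^ (-e).toNat)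
  1 + (if 0 ≤ y.2 then y.1 * 2 ^ y.2.toNat else PySem.Int.floordiv y.1 (2 ^ (-y.2).toNat))

-- ===== PORT A =====

-- math.ceil(math.log(B, v)) = the least k with B ≤ v^k: exact on Pre_ (2 ≤ B ≤ 2^31,
-- 2 ≤ v, B not a power v^k with k ≥ 2); at such powers the float value is a libm
-- artefact, which Pre_ excludes (B = v gives exactly log(v)/log(v) = 1.0, kept inside).
def pvCeilLog (B v : Int) : Int := ((List.range 64).findIdx (fun k => decide (B ≤ v ^ k)) : Int)

def digit_overlap (id : Int) (B : Int) (p : Int) (v : Int) : Int :=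
  let id_str := pvRevStr id                          -- id_str = str(id)[::-1]
  let n := pvCeilLog B v                             -- n = math.ceil(math.log(B, v))
  -- q = math.floor(p / n * 2): exact, because the double p/n*2 is within 2^-21 of the
  -- real 2p/n (|p| ≤ 2^31), a non-integer 2p/n is ≥ 1/n ≥ 1/32 away from an integer,
  -- and an integer 2p/n makes p/n = m/2 an exactly representable double.
  let q := PySem.Int.floordiv (2 * p) n
  let T := (PySem.List.pyRange 0 (q + 1) 1).foldl (fun T k =>
      (PySem.List.pyRange 0 n 1).foldl (fun T i =>
        let r := 2 * k * n + i
        if r < p then T + pvDigit id_str r * v ^ i.toNat else T) T) 0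
  let T := (PySem.List.pyRange 1 (q + 1) 1).foldl (fun T k =>
      (PySem.List.pyRange 0 n 1).foldl (fun T i =>
        let s := 2 * k * n - i - 1
        if s < p then T + pvDigit id_str s * v ^ i.toNat else T) T) T
  pvFinish B (v ^ n.toNat) (PySem.Int.mod T (v ^ n.toNat))   -- T %= v**n; 1 + floor(B/(v**n)*T)

-- ===== PORT B =====

-- n = 0; x = 1; while x < B: x *= v; n += 1   (fuel only makes the loop total in Lean;
-- with 2 ≤ v it runs at most 32 times for |B| ≤ 2^31, and Python diverges only outside Pre_)
def pvNLoop (B v : Int) : Nat → Int → Int → Int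
  | 0, _, n => n
  | fuel + 1, x, n => if x < B then pvNLoop B v fuel (x * v) (n + 1) else n

def digit_overlap_alt (id : Int) (B : Int) (p : Int) (v : Int) : Int :=
  let id_str := pvRevStr id
  let n := pvNLoop B v 64 1 0
  let T := (PySem.List.pyRange 0 p 1).foldl (fun T r =>
      let band := PySem.Int.floordiv r n
      let off := PySem.Int.mod r n
      T + pvDigit id_str r *
        (if PySem.Int.mod band 2 = 0 then v ^ off.toNat else v ^ (n - 1 - off).toNat)) 0
  pvFinish B (v ^ n.toNat) (PySem.Int.mod T (v ^ n.toNat))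

-- ===== PRECONDITION & SPEC =====

-- Pre_ excludes: B ≤ 1 or v ≤ 1 (math.log raises / ZeroDivisionError), p larger than the
-- number of decimal digits of |id| (int() hits '-' or an IndexError), and B an exact power
-- v^k with k ≥ 2 — there A still returns, but its n = ceil(math.log(B, v)) hinges on how
-- the platform libm rounds a log that is exactly an integer (on most such inputs it rounds
-- exactly and A agrees with B, e.g. B = 8, v = 2; on some it does not, e.g. B = 125, v = 5),
-- so the value is a platform artefact no port can reproduce, while B uses exact integer
-- arithmetic for n.  B = v (k = 1) stays inside Pre_: log(v)/log(v) is exactly 1.0.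
def Pre_digit_overlap (id : Int) (B : Int) (p : Int) (v : Int) : Prop :=
  2 ≤ B ∧ 2 ≤ v ∧ p ≤ ((PySem.Int.toChars (if id < 0 then -id else id)).length : Int) ∧
    ∀ k ∈ List.range 64, B ≠ v ^ (k + 2)
instance (id : Int) (B : Int) (p : Int) (v : Int) : Decidable (Pre_digit_overlap id B p v) := by
  unfold Pre_digit_overlap; infer_instance

def pvWitness_digit_overlap : Int × Int × Int × Int := (123456789, 101, 9, 10)

def Spec_digit_overlap (id : Int) (B : Int) (p : Int) (v : Int) (out : Int) : Prop := out = digit_overlap_alt id B p v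
instance (id : Int) (B : Int) (p : Int) (v : Int) (out : Int) : Decidable (Spec_digit_overlap id B p v out) := by unfold Spec_digit_overlap; infer_instance

-- ===== CLAIM (what is proved, stated in full; the proofs are below) =====
def Claim_equal_digit_overlap : Prop := ∀ (id : Int) (B : Int) (p : Int) (v : Int), Dom_digit_overlap id B p v → Pre_digit_overlap id B p v → Spec_digit_overlap id B p v (digit_overlap id B p v)

-- ===== LEMMAS AND PROOFS =====

-- the least k with B ≤ v^k on the admitted inputs: bounds and minimality of findIdx
theorem pv_findIdx_facts (B v : Int) (hB : 2 ≤ B) (hBle : B ≤ 2147483648) (hv : 2 ≤ v) :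
    let N := (List.range 64).findIdx (fun k => decide (B ≤ v ^ k))
    1 ≤ N ∧ N < 64 ∧ B ≤ v ^ N ∧ (∀ j, j < N → v ^ j < B) := by
  intro N
  have hex : ∃ x ∈ List.range 64, (fun k => decide (B ≤ v ^ k)) x = true := by
    refine ⟨32, by simp, ?_⟩
    simp only [decide_eq_true_eq]
    calc B ≤ 2147483648 := hBle
    _ ≤ 2 ^ 32 := by norm_num
    _ ≤ v ^ 32 := pow_le_pow_left₀ (by norm_num) hv 32
  have hlt : N < 64 := by
    have := List.findIdx_lt_length_of_exists hex
    simpa using this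
  have hsat : B ≤ v ^ N := by
    have h := @List.findIdx_getElem _ (fun k => decide (B ≤ v ^ k)) (List.range 64) (by simpa using hlt)
    simpa using h
  have hmin : ∀ j, j < N → v ^ j < B := by
    intro j hj
    have h := List.not_of_lt_findIdx (p := fun k => decide (B ≤ v ^ k)) (xs := List.range 64) (i := j) hj
    have hjlen : j < 64 := by omega
    simp only [List.getElem_range, decide_eq_false_iff_not] at h
    omega
  have hpos : 1 ≤ N := by
    rcases Nat.eq_zero_or_pos N with h | h
    · exfalso; rw [h, pow_zero] at hsat; omega
    · exact h
  exact ⟨hpos, hlt, hsat, hmin⟩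

-- the while-loop of B computes the same least k
theorem pv_nloop_inv (B v : Int) (N : Nat)
    (hsat : B ≤ v ^ N) (hmin : ∀ j, j < N → v ^ j < B) :
    ∀ (f m : Nat), m ≤ N → N ≤ m + f → pvNLoop B v f (v ^ m) (m : Int) = (N : Int) := by
  intro f
  induction f with
  | zero => intro m h1 h2; simp only [pvNLoop]; congr 1; omega
  | succ f ih =>
    intro m h1 h2
    simp only [pvNLoop]
    by_cases h : v ^ m < B
    · rw [if_pos h]
      have hmN : m < N := by
        rcases Nat.lt_or_ge m N with hh | hh
        · exact hh
        · exfalso; have : m = N := by omega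
          rw [this] at h; omega
      have := ih (m + 1) (by omega) (by omega)
      rw [pow_succ] at this
      rw [show ((m : Int) + 1) = ((m + 1 : Nat) : Int) by push_cast; ring]
      exact this
    · rw [if_neg h]
      have : ¬ m < N := fun hc => h (hmin m hc)
      congr 1; omega

theorem pv_N_pos (B v : Int) (hB : 2 ≤ B) (hBle : B ≤ 2147483648) (hv : 2 ≤ v) :
    1 ≤ (List.range 64).findIdx (fun k => decide (B ≤ v ^ k)) :=
  (pv_findIdx_facts B v hB hBle hv).1

theorem pv_n_eq (B v : Int) (hB : 2 ≤ B) (hBle : B ≤ 2147483648) (hv : 2 ≤ v) :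
    pvNLoop B v 64 1 0 = pvCeilLog B v := by
  obtain ⟨h1, h2, h3, h4⟩ := pv_findIdx_facts B v hB hBle hv
  have := pv_nloop_inv B v _ h3 h4 64 0 (by omega) (by omega)
  simpa [pvCeilLog] using this

-- splitting a position r into its 2N-block: quotient, remainder, and band parity
theorem pv_band (N r : Nat) (hN : 1 ≤ N) :
    r = 2 * (N * (r / (2 * N))) + r % (2 * N) ∧ r % (2 * N) < 2 * N ∧
      r / N = r % (2 * N) / N + 2 * (r / (2 * N)) ∧ r % (2 * N) / N ≤ 1 ∧
      r / N % 2 = r % (2 * N) / N := by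
  have hdm : 2 * N * (r / (2 * N)) + r % (2 * N) = r := Nat.div_add_mod r (2 * N)
  have hu : r % (2 * N) < 2 * N := Nat.mod_lt _ (by omega)
  have e1 : 2 * N * (r / (2 * N)) = 2 * (N * (r / (2 * N))) := by ring
  have e2 : N * (2 * (r / (2 * N))) = 2 * (N * (r / (2 * N))) := by ring
  have hr : r = r % (2 * N) + N * (2 * (r / (2 * N))) := by omega
  have hdiv : r / N = r % (2 * N) / N + 2 * (r / (2 * N)) := by
    conv_lhs => rw [hr]
    exact Nat.add_mul_div_left _ _ (by omega)
  have hle : r % (2 * N) / N ≤ 1 := by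
    have := (Nat.div_lt_iff_lt_mul (by omega : 0 < N)).mpr (by omega : r % (2 * N) < 2 * N)
    omega
  refine ⟨by omega, hu, hdiv, hle, ?_⟩
  rw [hdiv, Nat.add_mul_mod_self_left]
  exact Nat.mod_eq_of_lt (by omega)

-- the even-band reindexing: A's first double loop = the even-band part of one pass
theorem pv_even_sum (G : Nat → Int) (N Q P : Nat) (hN : 1 ≤ N)
    (hQ : ∀ r, r < P → r / (2 * N) ≤ Q) :
    ∑ k ∈ Finset.range (Q + 1), ∑ i ∈ Finset.range N,
        (if 2 * k * N + i < P then G (2 * k * N + i) else 0)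
      = ∑ r ∈ Finset.range P, (if (r / N) % 2 = 0 then G r else 0) := by
  rw [← Finset.sum_product', ← Finset.sum_filter, ← Finset.sum_filter]
  apply Finset.sum_nbij' (i := fun x => 2 * x.1 * N + x.2) (j := fun r => (r / (2 * N), r % (2 * N)))
  · rintro ⟨k, i⟩ hx
    simp only [Finset.mem_filter, Finset.mem_product, Finset.mem_range] at hx ⊢
    obtain ⟨⟨hk, hi⟩, hlt⟩ := hx
    have hdiv : (2 * k * N + i) / N = i / N + 2 * k := by
      rw [show 2 * k * N + i = i + N * (2 * k) by ring]
      exact Nat.add_mul_div_left i (2 * k) (by omega)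
    have hi0 : i / N = 0 := Nat.div_eq_of_lt hi
    exact ⟨hlt, by rw [hdiv, hi0]; omega⟩
  · intro r hr
    simp only [Finset.mem_filter, Finset.mem_range] at hr
    obtain ⟨hrP, hband⟩ := hr
    obtain ⟨hdm, hu, hdiv, hle, hpar⟩ := pv_band N r hN
    have hu0 : r % (2 * N) / N = 0 := by omega
    have huN : r % (2 * N) < N := Nat.lt_of_div_eq_zero (by omega) hu0
    simp only [Finset.mem_filter, Finset.mem_product, Finset.mem_range]
    refine ⟨⟨by have := hQ r hrP; omega, huN⟩, ?_⟩
    have e2 : 2 * (r / (2 * N)) * N = 2 * (N * (r / (2 * N))) := by ring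
    omega
  · rintro ⟨k, i⟩ hx
    simp only [Finset.mem_filter, Finset.mem_product, Finset.mem_range] at hx
    obtain ⟨⟨hk, hi⟩, hlt⟩ := hx
    have h1 : (2 * k * N + i) / (2 * N) = k := by
      rw [show 2 * k * N + i = i + 2 * N * k by ring, Nat.add_mul_div_left _ _ (by omega),
        Nat.div_eq_of_lt (by omega)]
      omega
    have h2 : (2 * k * N + i) % (2 * N) = i := by
      rw [show 2 * k * N + i = i + k * (2 * N) by ring, Nat.add_mul_mod_self_right,
        Nat.mod_eq_of_lt (by omega)]
    simp [h1, h2]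
  · intro r hr
    simp only [Finset.mem_filter, Finset.mem_range] at hr
    obtain ⟨hdm, hu, hdiv, hle, hpar⟩ := pv_band N r hN
    simp only []
    have e2 : 2 * (r / (2 * N)) * N = 2 * (N * (r / (2 * N))) := by ring
    omega
  · rintro ⟨k, i⟩ _; rfl

-- the odd-band reindexing: A's second double loop = the odd-band part of one pass
theorem pv_odd_sum (G : Nat → Int) (N Q P : Nat) (hN : 1 ≤ N)
    (hQ : ∀ r, r < P → (r / N) % 2 = 1 → r / (2 * N) + 1 ≤ Q) :
    ∑ k ∈ Finset.range Q, ∑ i ∈ Finset.range N,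
        (if 2 * (k + 1) * N - i - 1 < P then G (2 * (k + 1) * N - i - 1) else 0)
      = ∑ r ∈ Finset.range P, (if (r / N) % 2 = 1 then G r else 0) := by
  rw [← Finset.sum_product', ← Finset.sum_filter, ← Finset.sum_filter]
  apply Finset.sum_nbij' (i := fun x => 2 * (x.1 + 1) * N - x.2 - 1)
    (j := fun r => (r / (2 * N), 2 * N - r % (2 * N) - 1))
  · rintro ⟨k, i⟩ hx
    simp only [Finset.mem_filter, Finset.mem_product, Finset.mem_range] at hx ⊢
    obtain ⟨⟨hk, hi⟩, hlt⟩ := hx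
    have e1 : 2 * (k + 1) * N = 2 * (N * k) + 2 * N := by ring
    have hs : 2 * (k + 1) * N - i - 1 = (N - 1 - i) + N * (2 * k + 1) := by
      have e2 : N * (2 * k + 1) = 2 * (N * k) + N := by ring
      omega
    have hdiv : (2 * (k + 1) * N - i - 1) / N = 2 * k + 1 := by
      rw [hs, Nat.add_mul_div_left _ _ (by omega), Nat.div_eq_of_lt (by omega)]
      omega
    exact ⟨hlt, by rw [hdiv]; omega⟩
  · intro r hr
    simp only [Finset.mem_filter, Finset.mem_range] at hr
    obtain ⟨hrP, hband⟩ := hr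
    obtain ⟨hdm, hu, hdiv, hle, hpar⟩ := pv_band N r hN
    have hu1 : r % (2 * N) / N = 1 := by omega
    have huN : N ≤ r % (2 * N) := by
      rcases Nat.lt_or_ge (r % (2 * N)) N with h | h
      · rw [Nat.div_eq_of_lt h] at hu1; omega
      · exact h
    simp only [Finset.mem_filter, Finset.mem_product, Finset.mem_range]
    refine ⟨⟨by have := hQ r hrP hband; omega, by omega⟩, ?_⟩
    have e1 : 2 * (r / (2 * N) + 1) * N = 2 * (N * (r / (2 * N))) + 2 * N := by ring
    omega
  · rintro ⟨k, i⟩ hx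
    simp only [Finset.mem_filter, Finset.mem_product, Finset.mem_range] at hx
    obtain ⟨⟨hk, hi⟩, hlt⟩ := hx
    have e1 : 2 * (k + 1) * N = 2 * N * k + 2 * N := by ring
    have h1 : (2 * (k + 1) * N - i - 1) / (2 * N) = k := by
      rw [show 2 * (k + 1) * N - i - 1 = (2 * N - 1 - i) + 2 * N * k by omega,
        Nat.add_mul_div_left _ _ (by omega), Nat.div_eq_of_lt (by omega)]
      omega
    have h2 : (2 * (k + 1) * N - i - 1) % (2 * N) = 2 * N - 1 - i := by
      rw [show 2 * (k + 1) * N - i - 1 = (2 * N - 1 - i) + k * (2 * N) by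
          have e2 : k * (2 * N) = 2 * N * k := by ring
          omega,
        Nat.add_mul_mod_self_right, Nat.mod_eq_of_lt (by omega)]
    simp [h1, h2]
    omega
  · intro r hr
    simp only [Finset.mem_filter, Finset.mem_range] at hr
    obtain ⟨hdm, hu, hdiv, hle, hpar⟩ := pv_band N r hN
    have hu1 : r % (2 * N) / N = 1 := by omega
    have huN : N ≤ r % (2 * N) := by
      rcases Nat.lt_or_ge (r % (2 * N)) N with h | h
      · rw [Nat.div_eq_of_lt h] at hu1; omega
      · exact h
    simp only []
    have e1 : 2 * (r / (2 * N) + 1) * N = 2 * (N * (r / (2 * N))) + 2 * N := by ring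
    omega
  · rintro ⟨k, i⟩ _; rfl

-- a guarded accumulating loop is an init + a sum
theorem pv_foldl_guard (l : List Int) (c : Int → Prop) [DecidablePred c] (g : Int → Int) (a : Int) :
    l.foldl (fun T x => if c x then T + g x else T) a
      = a + (l.map (fun x => if c x then g x else 0)).sum := by
  rw [show (fun (T x : Int) => if c x then T + g x else T)
        = fun T x => T + (if c x then g x else 0) by funext T x; split <;> ring]
  exact PySem.List.foldl_add l _ a

theorem pv_mod1 (N k i : Nat) (hi : i < N) : (2 * k * N + i) % N = i := by
  rw [show 2 * k * N + i = i + (2 * k) * N by ring, Nat.add_mul_mod_self_right,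
    Nat.mod_eq_of_lt hi]

theorem pv_mod2 (N k i : Nat) (hi : i < N) : (2 * (k + 1) * N - i - 1) % N = N - 1 - i := by
  rw [show 2 * (k + 1) * N - i - 1 = (N - 1 - i) + (2 * k + 1) * N by
      have e1 : 2 * (k + 1) * N = 2 * (N * k) + 2 * N := by ring
      have e2 : (2 * k + 1) * N = 2 * (N * k) + N := by ring
      omega,
    Nat.add_mul_mod_self_right, Nat.mod_eq_of_lt (by omega)]

theorem pv_sum_pyRange_zero (M : Nat) (f : Int → Int) :
    ((PySem.List.pyRange 0 (M : Int) 1).map f).sum = ∑ k ∈ Finset.range M, f (k : Int) := by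
  rw [PySem.List.pyRange_zero_natCast, List.map_map]; rfl

theorem pv_sum_pyRange_one' (b : Nat) (f : Int → Int) :
    ((PySem.List.pyRange 1 (((b + 1 : Nat) : Int)) 1).map f).sum = ∑ k ∈ Finset.range b, f (1 + (k : Int)) := by
  rw [PySem.List.pyRange_one, List.map_map]
  simp only [Nat.cast_add, Nat.cast_one, add_sub_cancel_right, Int.toNat_natCast]
  rfl

-- the T accumulators agree
theorem pv_T_eq (ds : List Char) (p v : Int) (N : Nat) (hN : 1 ≤ N) :
    (PySem.List.pyRange 1 (PySem.Int.floordiv (2 * p) (N : Int) + 1) 1).foldl (fun T k =>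
      (PySem.List.pyRange 0 (N : Int) 1).foldl (fun T i =>
        if 2 * k * (N : Int) - i - 1 < p then T + pvDigit ds (2 * k * (N : Int) - i - 1) * v ^ i.toNat else T) T)
      ((PySem.List.pyRange 0 (PySem.Int.floordiv (2 * p) (N : Int) + 1) 1).foldl (fun T k =>
        (PySem.List.pyRange 0 (N : Int) 1).foldl (fun T i =>
          if 2 * k * (N : Int) + i < p then T + pvDigit ds (2 * k * (N : Int) + i) * v ^ i.toNat else T) T) 0)
    = (PySem.List.pyRange 0 p 1).foldl (fun T r =>
        T + pvDigit ds r *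
          (if PySem.Int.mod (PySem.Int.floordiv r (N : Int)) 2 = 0
           then v ^ (PySem.Int.mod r (N : Int)).toNat
           else v ^ ((N : Int) - 1 - PySem.Int.mod r (N : Int)).toNat)) 0 := by
  have hNpos : (0:Int) < (N : Int) := by exact_mod_cast hN
  by_cases hp0 : p < 0
  · have hq : PySem.Int.floordiv (2 * p) (N : Int) < 0 := by
      rw [PySem.Int.floordiv_eq_ediv_of_pos hNpos]
      exact Int.ediv_neg_of_neg_of_pos (by omega) hNpos
    rw [PySem.List.pyRange_one_eq_nil (by omega : p ≤ (0:Int)),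
      PySem.List.pyRange_one_eq_nil (by omega : PySem.Int.floordiv (2 * p) (N : Int) + 1 ≤ (0:Int)),
      PySem.List.pyRange_one_eq_nil (by omega : PySem.Int.floordiv (2 * p) (N : Int) + 1 ≤ (1:Int))]
    rfl
  · rw [not_lt] at hp0
    set P : Nat := p.toNat with hPdef
    have hpP : p = (P : Int) := by omega
    have hq : PySem.Int.floordiv (2 * p) (N : Int) = ((2 * P / N : Nat) : Int) := by
      rw [hpP, show (2 * (P : Int)) = ((2 * P : Nat) : Int) by push_cast; ring]
      exact PySem.Int.floordiv_natCast (2 * P) N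
    -- first double loop → map/sum form
    rw [show (fun (T k : Int) =>
          (PySem.List.pyRange 0 (N : Int) 1).foldl (fun T i =>
            if 2 * k * (N : Int) + i < p then T + pvDigit ds (2 * k * (N : Int) + i) * v ^ i.toNat else T) T)
        = fun T k => T + ((PySem.List.pyRange 0 (N : Int) 1).map (fun i =>
            if 2 * k * (N : Int) + i < p then pvDigit ds (2 * k * (N : Int) + i) * v ^ i.toNat else 0)).sum by
      funext T k
      exact pv_foldl_guard _ _ _ T]
    rw [show (fun (T k : Int) =>
          (PySem.List.pyRange 0 (N : Int) 1).foldl (fun T i =>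
            if 2 * k * (N : Int) - i - 1 < p then T + pvDigit ds (2 * k * (N : Int) - i - 1) * v ^ i.toNat else T) T)
        = fun T k => T + ((PySem.List.pyRange 0 (N : Int) 1).map (fun i =>
            if 2 * k * (N : Int) - i - 1 < p then pvDigit ds (2 * k * (N : Int) - i - 1) * v ^ i.toNat else 0)).sum by
      funext T k
      exact pv_foldl_guard _ _ _ T]
    rw [show (fun (T r : Int) =>
          T + pvDigit ds r *
            (if PySem.Int.mod (PySem.Int.floordiv r (N : Int)) 2 = 0
             then v ^ (PySem.Int.mod r (N : Int)).toNat
             else v ^ ((N : Int) - 1 - PySem.Int.mod r (N : Int)).toNat))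
        = fun T r => T + (fun r => pvDigit ds r *
            (if PySem.Int.mod (PySem.Int.floordiv r (N : Int)) 2 = 0
             then v ^ (PySem.Int.mod r (N : Int)).toNat
             else v ^ ((N : Int) - 1 - PySem.Int.mod r (N : Int)).toNat)) r from rfl]
    rw [PySem.List.foldl_add, PySem.List.foldl_add, PySem.List.foldl_add, zero_add, zero_add, hq, hpP,
      show (((2 * P / N : Nat) : Int) + 1) = ((2 * P / N + 1 : Nat) : Int) by push_cast; ring,
      pv_sum_pyRange_zero, pv_sum_pyRange_one', pv_sum_pyRange_zero]
    simp only [pv_sum_pyRange_zero]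
    -- now everything is Finset sums over Nat ranges with casts
    rw [show ∑ k ∈ Finset.range (2 * P / N + 1), ∑ i ∈ Finset.range N,
          (if 2 * (k : Int) * (N : Int) + (i : Int) < (P : Int)
           then pvDigit ds (2 * (k : Int) * (N : Int) + (i : Int)) * v ^ ((i : Int)).toNat else 0)
        = ∑ k ∈ Finset.range (2 * P / N + 1), ∑ i ∈ Finset.range N,
          (if 2 * k * N + i < P then (fun (r : Nat) => pvDigit ds (r : Int) * v ^ (r % N)) (2 * k * N + i) else 0) by
      refine Finset.sum_congr rfl fun k _ => Finset.sum_congr rfl fun i hi => ?_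
      simp only [Finset.mem_range] at hi
      rw [show 2 * (k : Int) * (N : Int) + (i : Int) = ((2 * k * N + i : Nat) : Int) by push_cast; ring]
      by_cases h : 2 * k * N + i < P
      · rw [if_pos (by exact_mod_cast h), if_pos h]
        simp [pv_mod1 N k i hi]
      · rw [if_neg (by exact_mod_cast h), if_neg h]]
    rw [show ∑ k ∈ Finset.range (2 * P / N), ∑ i ∈ Finset.range N,
          (if 2 * (1 + (k : Int)) * (N : Int) - (i : Int) - 1 < (P : Int)
           then pvDigit ds (2 * (1 + (k : Int)) * (N : Int) - (i : Int) - 1) * v ^ ((i : Int)).toNat else 0)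
        = ∑ k ∈ Finset.range (2 * P / N), ∑ i ∈ Finset.range N,
          (if 2 * (k + 1) * N - i - 1 < P then (fun (r : Nat) => pvDigit ds (r : Int) * v ^ (N - 1 - r % N)) (2 * (k + 1) * N - i - 1) else 0) by
      refine Finset.sum_congr rfl fun k _ => Finset.sum_congr rfl fun i hi => ?_
      simp only [Finset.mem_range] at hi
      have hsub : 2 * (1 + (k : Int)) * (N : Int) - (i : Int) - 1 = ((2 * (k + 1) * N - i - 1 : Nat) : Int) := by
        have hge : i + 1 ≤ 2 * (k + 1) * N := by
          have e1 : 2 * (k + 1) * N = 2 * (N * k) + 2 * N := by ring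
          omega
        rw [show 2 * (k + 1) * N - i - 1 = 2 * (k + 1) * N - (i + 1) by omega, Nat.cast_sub hge]
        push_cast
        ring
      rw [hsub]
      by_cases h : 2 * (k + 1) * N - i - 1 < P
      · rw [if_pos (by exact_mod_cast h), if_pos h]
        simp [pv_mod2 N k i hi, show N - 1 - (N - 1 - i) = i by omega]
      · rw [if_neg (by exact_mod_cast h), if_neg h]]
    rw [show ∑ k ∈ Finset.range P, ((fun (r : Int) => pvDigit ds r *
          (if PySem.Int.mod (PySem.Int.floordiv r (N : Int)) 2 = 0
           then v ^ (PySem.Int.mod r (N : Int)).toNat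
           else v ^ ((N : Int) - 1 - PySem.Int.mod r (N : Int)).toNat)) ((k : Nat) : Int))
        = ∑ r ∈ Finset.range P, ((if (r / N) % 2 = 0 then (fun (r : Nat) => pvDigit ds (r : Int) * v ^ (r % N)) r else 0)
            + (if (r / N) % 2 = 1 then (fun (r : Nat) => pvDigit ds (r : Int) * v ^ (N - 1 - r % N)) r else 0)) by
      refine Finset.sum_congr rfl fun r _ => ?_
      simp only [PySem.Int.floordiv_natCast]
      rw [show ((2 : Int)) = ((2 : Nat) : Int) from rfl]
      simp only [PySem.Int.mod_natCast]
      have hrN : r % N < N := Nat.mod_lt _ (by omega)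
      rw [show ((N : Int) - 1 - ((r % N : Nat) : Int)) = ((N - 1 - r % N : Nat) : Int) by push_cast; omega,
        Int.toNat_natCast, Int.toNat_natCast]
      rcases Nat.mod_two_eq_zero_or_one (r / N) with h | h <;>
        simp [h]]
    have hQ1 : ∀ r, r < P → r / (2 * N) ≤ 2 * P / N := by
      intro r hr
      have h1 : r / (2 * N) * (2 * N) ≤ r := Nat.div_mul_le_self r (2 * N)
      have e : r / (2 * N) * (2 * N) = 2 * (r / (2 * N) * N) := by ring
      exact (Nat.le_div_iff_mul_le (by omega : 0 < N)).mpr (by omega)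
    have hQ2 : ∀ r, r < P → (r / N) % 2 = 1 → r / (2 * N) + 1 ≤ 2 * P / N := by
      intro r hr hodd
      have h1 : r / (2 * N) * (2 * N) ≤ r := Nat.div_mul_le_self r (2 * N)
      have e : r / (2 * N) * (2 * N) = 2 * (r / (2 * N) * N) := by ring
      have hNr : N ≤ r := by
        by_contra h
        rw [Nat.div_eq_of_lt (by omega)] at hodd
        omega
      have e2 : (r / (2 * N) + 1) * N = r / (2 * N) * N + N := by ring
      exact (Nat.le_div_iff_mul_le (by omega : 0 < N)).mpr (by omega)
    rw [Finset.sum_add_distrib]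
    congr 1
    · exact pv_even_sum (fun (r : Nat) => pvDigit ds (r : Int) * v ^ (r % N)) N (2 * P / N) P hN hQ1
    · exact pv_odd_sum (fun (r : Nat) => pvDigit ds (r : Int) * v ^ (N - 1 - r % N)) N (2 * P / N) P hN hQ2

-- ===== VERDICT (by name: the statement is the Claim_ definition above) =====
theorem digit_overlap_spec : Claim_equal_digit_overlap := by
  intro id B p v hdom hpre
  obtain ⟨hB, hv, hp, hpow⟩ := hpre
  have hBle : B ≤ 2147483648 := by
    simp only [Dom_digit_overlap, pvDomInt, Bool.and_eq_true, decide_eq_true_eq] at hdom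
    omega
  unfold Spec_digit_overlap
  have hn : pvNLoop B v 64 1 0 = pvCeilLog B v := pv_n_eq B v hB hBle hv
  have hNca : pvCeilLog B v = (((List.range 64).findIdx (fun k => decide (B ≤ v ^ k)) : Nat) : Int) := rfl
  set N : Nat := (List.range 64).findIdx (fun k => decide (B ≤ v ^ k)) with hNdef
  have hN1 : 1 ≤ N := pv_N_pos B v hB hBle hv
  simp only [digit_overlap, digit_overlap_alt, hn, hNca, Int.toNat_natCast]
  rw [pv_T_eq (pvRevStr id) p v N hN1]
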